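-- pv_equiv track=rewrite | github.com/niki-liew/nikdan | 0.9.2/compiler.py | in_com
-- ===== SOURCE A (Python) =====
-- c_i_c = ['mri', 'mra', 'gk', 'agl', 'fopen', 'termin']
--
-- def in_com(args):
--     has_command = False
--     command = ''
--     argus = ''
--
--     for i in list(args):
--         if has_command == False:
--             if i != ' ':
--                 command += i
--
--             else:
--                 for j in c_i_c:
--                     if command == j:
--                         has_command = True
--                         break
--
--         else:
--             argus += i
--
--     return [command, argus]
-- ===== SOURCE B (Python) =====
-- c_i_c = ['mri', 'mra', 'gk', 'agl', 'fopen', 'termin']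
--
-- def in_com(args):
--     parts = args.split(' ')
--     command = ''
--     for k in range(len(parts) - 1):
--         command += parts[k]
--         if command in c_i_c:
--             return [command, ' '.join(parts[k + 1:])]
--     return [command + parts[-1], '']
-- ===== Notes on version B (the rewrite author's own statement) =====
-- stated objective: faster
-- what changed: B tokenises the string once with str.split and does a single pass over the tokens (membership-testing the growing command after each token except the last, rejoining the remaining tokens as the argument), instead of A's per-character scan with a boolean flag, character-by-character string concatenation and an inner scan over c_i_c at every space.
import Mathlib
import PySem

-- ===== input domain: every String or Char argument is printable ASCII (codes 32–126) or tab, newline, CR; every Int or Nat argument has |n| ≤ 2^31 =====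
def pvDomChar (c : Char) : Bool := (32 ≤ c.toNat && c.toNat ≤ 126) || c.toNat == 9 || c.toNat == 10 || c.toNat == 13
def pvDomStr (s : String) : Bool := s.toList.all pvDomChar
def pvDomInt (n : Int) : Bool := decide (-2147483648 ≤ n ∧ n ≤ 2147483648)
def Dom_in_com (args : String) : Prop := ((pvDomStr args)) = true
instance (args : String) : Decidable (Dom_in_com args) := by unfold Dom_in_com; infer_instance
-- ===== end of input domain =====

-- B tokenises the string once with split(' ') and walks the token list, instead of A's
-- per-character scan with a has_command flag; equal return value on every input.

def pvCic : List (List Char) := [['m','r','i'], ['m','r','a'], ['g','k'], ['a','g','l'], ['f','o','p','e','n'], ['t','e','r','m','i','n']]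

-- ===== PORT A =====
-- one iteration of A's character loop; state = (has_command, command, argus)
def inComStep (st : Bool × List Char × List Char) (i : Char) : Bool × List Char × List Char :=
  match st with
  | (hc, cmd, arg) =>
    if hc = false then
      if i ≠ ' ' then (hc, cmd ++ [i], arg)
      else if pvCic.any (fun j => cmd == j) then (true, cmd, arg)  -- inner 'for j in c_i_c' loop
      else (hc, cmd, arg)
    else (hc, cmd, arg ++ [i])

def in_com (args : String) : List String :=
  let r := args.toList.foldl inComStep (false, [], [])
  [String.ofList r.2.1, String.ofList r.2.2]

-- ===== PORT B =====
-- B's token pass: all tokens but the last feed command and are membership-tested;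
-- on a hit the remaining tokens are rejoined with ' '; the last token is only appended.
def pvAltLoop (cmd : List Char) : List (List Char) → List Char × List Char
  | [] => (cmd, [])
  | [p] => (cmd ++ p, [])
  | p :: q :: rest =>
      let cmd' := cmd ++ p
      if pvCic.contains cmd' then (cmd', PySem.Chars.join [' '] (q :: rest))
      else pvAltLoop cmd' (q :: rest)

def in_com_alt (args : String) : List String :=
  let parts := PySem.Chars.splitOn args.toList [' ']
  let r := pvAltLoop [] parts
  [String.ofList r.1, String.ofList r.2]

-- ===== PRECONDITION & SPEC =====
def Spec_in_com (args : String) (out : List String) : Prop := out = in_com_alt args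
instance (args : String) (out : List String) : Decidable (Spec_in_com args out) := by unfold Spec_in_com; infer_instance

-- ===== CLAIM (what is proved, stated in full; the proofs are below) =====
def Claim_equal_in_com : Prop := ∀ (args : String), Dom_in_com args → Spec_in_com args (in_com args)

-- ===== LEMMAS AND PROOFS =====

-- simple recursive characterisation of split(' ')
def pvMapHead (f : List Char → List Char) : List (List Char) → List (List Char)
  | [] => []
  | h :: tl => f h :: tl

def pvSplitSp : List Char → List (List Char)
  | [] => [[]]
  | c :: t => if c = ' ' then [] :: pvSplitSp t else pvMapHead (fun h => c :: h) (pvSplitSp t)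

theorem pvSplitSp_ne_nil (s : List Char) : pvSplitSp s ≠ [] := by
  induction s with
  | nil => simp [pvSplitSp]
  | cons c t ih =>
    simp only [pvSplitSp]
    split
    · simp
    · cases h : pvSplitSp t with
      | nil => exact absurd h ih
      | cons a b => simp [pvMapHead]

theorem pv_go_spec (l : List Char) : ∀ (fuel : Nat) (cur : List Char) (acc : List (List Char)),
    l.length ≤ fuel →
    PySem.Chars.splitOn.go [' '] fuel l cur acc
      = acc.reverse ++ pvMapHead (fun h => cur.reverse ++ h) (pvSplitSp l) := by
  induction l with
  | nil =>
    intro fuel cur acc _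
    cases fuel <;> simp [PySem.Chars.splitOn.go, pvSplitSp, pvMapHead]
  | cons c t ih =>
    intro fuel cur acc hf
    cases fuel with
    | zero => simp at hf
    | succ n =>
      simp only [List.length_cons] at hf
      by_cases hc : c = ' '
      · subst hc
        have hstep : PySem.Chars.splitOn.go [' '] (n+1) (' ' :: t) cur acc
            = PySem.Chars.splitOn.go [' '] n t [] (cur.reverse :: acc) := by
          simp [PySem.Chars.splitOn.go, List.isPrefixOf]
        rw [hstep, ih n [] (cur.reverse :: acc) (by omega)]
        simp only [pvSplitSp, reduceIte]
        cases h : pvSplitSp t with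
        | nil => exact absurd h (pvSplitSp_ne_nil t)
        | cons a b => simp [pvMapHead]
      · have hstep : PySem.Chars.splitOn.go [' '] (n+1) (c :: t) cur acc
            = PySem.Chars.splitOn.go [' '] n t (c :: cur) acc := by
          simp [PySem.Chars.splitOn.go, List.isPrefixOf, Ne.symm hc]
        rw [hstep, ih n (c :: cur) acc (by omega)]
        simp only [pvSplitSp, if_neg hc]
        cases h : pvSplitSp t with
        | nil => exact absurd h (pvSplitSp_ne_nil t)
        | cons a b => simp [pvMapHead]

theorem pv_splitOn_eq (s : List Char) : PySem.Chars.splitOn s [' '] = pvSplitSp s := by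
  have h := pv_go_spec s (s.length + 1) [] [] (by omega)
  simp only [PySem.Chars.splitOn] at *
  rw [h]
  cases hs : pvSplitSp s with
  | nil => exact absurd hs (pvSplitSp_ne_nil s)
  | cons a b => simp [pvMapHead]

theorem pv_join_splitSp (t : List Char) : PySem.Chars.join [' '] (pvSplitSp t) = t := by
  induction t with
  | nil => simp [pvSplitSp, PySem.Chars.join, List.intercalate]
  | cons c t ih =>
    by_cases hc : c = ' '
    · subst hc
      simp only [pvSplitSp, reduceIte]
      cases h : pvSplitSp t with
      | nil => exact absurd h (pvSplitSp_ne_nil t)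
      | cons a b =>
        rw [h] at ih
        simp [PySem.Chars.join, List.intercalate] at ih ⊢
        exact ih
    · simp only [pvSplitSp, if_neg hc]
      cases h : pvSplitSp t with
      | nil => exact absurd h (pvSplitSp_ne_nil t)
      | cons a b =>
        rw [h] at ih
        simp [pvMapHead, PySem.Chars.join, List.intercalate] at ih ⊢
        cases b <;> simp_all

-- once has_command is true, A just appends the rest to argus
theorem pv_foldl_true (t : List Char) : ∀ cmd arg,
    t.foldl inComStep (true, cmd, arg) = (true, cmd, arg ++ t) := by
  induction t with
  | nil => intro cmd arg; simp
  | cons c t ih =>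
    intro cmd arg
    simp only [List.foldl_cons]
    have hstep : inComStep (true, cmd, arg) c = (true, cmd, arg ++ [c]) := by
      simp [inComStep]
    rw [hstep, ih]
    simp

theorem pv_altLoop_mapHead (c : Char) (cmd h : List Char) (tl : List (List Char)) :
    pvAltLoop cmd (pvMapHead (fun x => c :: x) (h :: tl)) = pvAltLoop (cmd ++ [c]) (h :: tl) := by
  cases tl with
  | nil => simp [pvMapHead, pvAltLoop]
  | cons q r => simp [pvMapHead, pvAltLoop]

theorem pv_main (s : List Char) : ∀ cmd : List Char,
    ((s.foldl inComStep (false, cmd, [])).2.1, (s.foldl inComStep (false, cmd, [])).2.2)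
      = pvAltLoop cmd (pvSplitSp s) := by
  induction s with
  | nil => intro cmd; simp [pvSplitSp, pvAltLoop]
  | cons c t ih =>
    intro cmd
    simp only [List.foldl_cons]
    by_cases hc : c = ' '
    · subst hc
      by_cases hm : cmd ∈ pvCic
      · have hstep : inComStep (false, cmd, []) ' ' = (true, cmd, []) := by
          simp [inComStep, hm]
        rw [hstep, pv_foldl_true]
        simp only [pvSplitSp, reduceIte, List.nil_append]
        cases h : pvSplitSp t with
        | nil => exact absurd h (pvSplitSp_ne_nil t)
        | cons a b =>
          simp only [pvAltLoop, List.append_nil]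
          rw [if_pos (by simpa using hm), ← h, pv_join_splitSp]
      · have hstep : inComStep (false, cmd, []) ' ' = (false, cmd, []) := by
          simp [inComStep, hm]
        rw [hstep, ih cmd]
        simp only [pvSplitSp, reduceIte]
        cases h : pvSplitSp t with
        | nil => exact absurd h (pvSplitSp_ne_nil t)
        | cons a b =>
          simp only [pvAltLoop, List.append_nil]
          rw [if_neg (by simpa using hm)]
    · have hstep : inComStep (false, cmd, []) c = (false, cmd ++ [c], []) := by
        simp [inComStep, hc]
      rw [hstep, ih (cmd ++ [c])]
      simp only [pvSplitSp, if_neg hc]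
      cases h : pvSplitSp t with
      | nil => exact absurd h (pvSplitSp_ne_nil t)
      | cons a b => rw [pv_altLoop_mapHead]

-- ===== VERDICT (by name: the statement is the Claim_ definition above) =====
theorem in_com_spec : Claim_equal_in_com := by
  intro args _
  show in_com args = in_com_alt args
  show [String.ofList (args.toList.foldl inComStep (false, [], [])).2.1,
        String.ofList (args.toList.foldl inComStep (false, [], [])).2.2]
     = [String.ofList (pvAltLoop [] (PySem.Chars.splitOn args.toList [' '])).1,
        String.ofList (pvAltLoop [] (PySem.Chars.splitOn args.toList [' '])).2]
  rw [pv_splitOn_eq, ← pv_main args.toList []]
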